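-- pv_equiv track=rewrite | github.com/bryancostanich/rekolektion | scripts/characterize_cim_liberty.py | group_rows_by_col_pattern
-- ===== SOURCE A (Python) =====
-- def group_rows_by_col_pattern(
--     weights: list[list[int]],
-- ) -> list[tuple[tuple[int, ...], list[int]]]:
--     """Collapse rows with identical column patterns into one write group.
--
--     Uniform patterns (all_zero/all_one/alt_col): 1 group → 1 WL pulse.
--     Periodic-by-row (alt_row/checker): 2 groups → 2 pulses.
--     Random: ~N groups → effectively per-row sequential.
--     """
--     groups: dict[tuple[int, ...], list[int]] = {}
--     for r, row in enumerate(weights):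
--         key = tuple(row)
--         groups.setdefault(key, []).append(r)
--     return sorted(groups.items(), key=lambda kv: kv[1][0])
-- ===== SOURCE B (Python) =====
-- def group_rows_by_col_pattern(
--     weights: list[list[int]],
-- ) -> list[tuple[tuple[int, ...], list[int]]]:
--     """Two-pass grouping: ordered dedup of the patterns, then one index scan
--     per distinct pattern.  First-occurrence order already equals A's
--     sort-by-first-index order, so no dict and no final sort are needed."""
--     keys: list[tuple[int, ...]] = []
--     for row in weights:
--         t = tuple(row)
--         if t not in keys:
--             keys.append(t)
--     return [(t, [i for i, row in enumerate(weights) if tuple(row) == t])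
--             for t in keys]
-- ===== Notes on version B (the rewrite author's own statement) =====
-- stated objective: alternative
-- what changed: Replaced hash-dict bucketing followed by a sort of the groups with an ordered dedup of the patterns plus one index-collecting scan per distinct pattern, exploiting that first-occurrence order already equals the sort-by-first-index order.
import Mathlib
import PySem

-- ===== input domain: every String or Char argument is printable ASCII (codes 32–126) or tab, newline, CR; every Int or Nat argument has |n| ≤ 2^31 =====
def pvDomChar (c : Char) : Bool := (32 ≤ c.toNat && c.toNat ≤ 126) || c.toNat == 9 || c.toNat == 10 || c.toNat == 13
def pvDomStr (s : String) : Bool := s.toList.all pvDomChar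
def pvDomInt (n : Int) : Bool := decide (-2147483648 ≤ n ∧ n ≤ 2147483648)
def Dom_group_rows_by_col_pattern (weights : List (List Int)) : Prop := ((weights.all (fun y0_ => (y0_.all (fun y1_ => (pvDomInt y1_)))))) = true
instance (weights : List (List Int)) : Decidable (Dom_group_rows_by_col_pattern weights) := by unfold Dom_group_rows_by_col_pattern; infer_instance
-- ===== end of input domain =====

-- B replaces A's dict-bucketing-then-sort with an ordered dedup of the patterns plus one
-- index scan per distinct pattern (objective: alternative decomposition, similar cost).

-- ===== PORT A =====
-- kv[1][0] is ported as kv.2.headD 0: every index list the dict holds is nonempty, so the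
-- Python subscript never raises and headD is exact there.
def group_rows_by_col_pattern (weights : List (List Int)) : List (List Int × List Int) :=
  PySem.List.sorted
    ((PySem.List.enumerate weights).foldl
        (fun d p => PySem.Dict.modify d p.2 [] (fun v => v ++ [p.1]))
        PySem.Dict.empty).items
    (fun kv => kv.2.headD 0) false

-- ===== PORT B =====
def group_rows_by_col_pattern_alt (weights : List (List Int)) : List (List Int × List Int) :=
  (weights.foldl (fun acc row => if row ∈ acc then acc else acc ++ [row]) []).map
    (fun t =>
      (t, (PySem.List.enumerate weights).filterMap
            (fun p => if p.2 = t then some p.1 else none)))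

-- ===== PRECONDITION & SPEC =====
def Spec_group_rows_by_col_pattern (weights : List (List Int)) (out : List (List Int × List Int)) : Prop := out = group_rows_by_col_pattern_alt weights
instance (weights : List (List Int)) (out : List (List Int × List Int)) : Decidable (Spec_group_rows_by_col_pattern weights out) := by unfold Spec_group_rows_by_col_pattern; infer_instance

-- ===== CLAIM (what is proved, stated in full; the proofs are below) =====
def Claim_equal_group_rows_by_col_pattern : Prop := ∀ (weights : List (List Int)), Dom_group_rows_by_col_pattern weights → Spec_group_rows_by_col_pattern weights (group_rows_by_col_pattern weights)

-- ===== LEMMAS AND PROOFS =====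

-- indices (starting at s) of the rows of w equal to t
def pvOcc (t : List Int) (w : List (List Int)) (s : Int) : List Int :=
  (PySem.List.enumerate w s).filterMap (fun p => if p.2 = t then some p.1 else none)

-- the distinct rows of w not in `seen`, in first-occurrence order
def pvNewKeys (seen : List (List Int)) : List (List Int) → List (List Int)
  | [] => []
  | r :: t => if r ∈ seen then pvNewKeys seen t else r :: pvNewKeys (r :: seen) t

theorem pvEnum_cons (x : List Int) (t : List (List Int)) (s : Int) :
    PySem.List.enumerate (x :: t) s = (s, x) :: PySem.List.enumerate t (s + 1) := by
  simp [PySem.List.enumerate]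

theorem pvOcc_cons (t r : List Int) (w : List (List Int)) (s : Int) :
    pvOcc t (r :: w) s = (if r = t then [s] else []) ++ pvOcc t w (s + 1) := by
  by_cases h : r = t
  · simp [pvOcc, h]
  · simp [pvOcc, h]

theorem pvNewKeys_congr (s1 s2 : List (List Int)) (w : List (List Int))
    (h : ∀ x, x ∈ s1 ↔ x ∈ s2) : pvNewKeys s1 w = pvNewKeys s2 w := by
  induction w generalizing s1 s2 with
  | nil => rfl
  | cons r t ih =>
    simp only [pvNewKeys, h r]
    split
    · exact ih s1 s2 h
    · exact congrArg (r :: ·) (ih (r :: s1) (r :: s2) (by intro x; simp [h x]))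

theorem pvMem_newKeys (seen w : List (List Int)) (k : List Int) :
    k ∈ pvNewKeys seen w → k ∉ seen := by
  induction w generalizing seen with
  | nil => intro hk; simp [pvNewKeys] at hk
  | cons r t ih =>
    intro hk
    by_cases hr : r ∈ seen
    · rw [pvNewKeys, if_pos hr] at hk
      exact ih seen hk
    · rw [pvNewKeys, if_neg hr] at hk
      rcases List.mem_cons.mp hk with h | h
      · subst h; exact hr
      · exact fun hm => ih (r :: seen) h (List.mem_cons_of_mem _ hm)

theorem pvOcc_head (seen w : List (List Int)) (k : List Int) (s : Int) :
    k ∈ pvNewKeys seen w → ∃ j l, pvOcc k w s = j :: l ∧ s ≤ j := by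
  induction w generalizing seen s with
  | nil => intro hk; simp [pvNewKeys] at hk
  | cons r t ih =>
    intro hk
    by_cases hr : r ∈ seen
    · rw [pvNewKeys, if_pos hr] at hk
      have hne : r ≠ k := fun h => (pvMem_newKeys seen t k hk) (h ▸ hr)
      rw [pvOcc_cons, if_neg hne]
      obtain ⟨j, l, hjl, hj⟩ := ih (seen := seen) (s := s + 1) hk
      exact ⟨j, l, by simp [hjl], by omega⟩
    · rw [pvNewKeys, if_neg hr] at hk
      rcases List.mem_cons.mp hk with h | h
      · subst h
        exact ⟨s, pvOcc k t (s + 1), by rw [pvOcc_cons, if_pos rfl]; rfl, le_refl s⟩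
      · have hne : r ≠ k := fun he =>
          (pvMem_newKeys (r :: seen) t k h) (he ▸ List.mem_cons_self)
        rw [pvOcc_cons, if_neg hne]
        obtain ⟨j, l, hjl, hj⟩ := ih (seen := r :: seen) (s := s + 1) h
        exact ⟨j, l, by simp [hjl], by omega⟩

theorem pvFind_of_mem_nodup (l : List ((List Int) × List Int)) (p : (List Int) × List Int)
    (hnd : (l.map Prod.fst).Nodup) (hp : p ∈ l) :
    l.find? (fun q => q.1 == p.1) = some p := by
  induction l with
  | nil => simp at hp
  | cons q t ih =>
    simp only [List.map_cons, List.nodup_cons] at hnd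
    rcases List.mem_cons.mp hp with h | h
    · subst h; simp [List.find?]
    · have hne : ¬ (q.1 == p.1) = true := by
        intro hb
        exact hnd.1 (beq_iff_eq.mp hb ▸ List.mem_map_of_mem (f := Prod.fst) h)
      simp only [List.find?, hne]
      exact ih hnd.2 h

-- the dict-building loop of A, characterised on an arbitrary nodup-key dict
theorem pvFold (w : List (List Int)) (s : Int) (l : List ((List Int) × List Int))
    (hnd : (l.map Prod.fst).Nodup) :
    ((PySem.List.enumerate w s).foldl
        (fun d p => PySem.Dict.modify d p.2 [] (fun v => v ++ [p.1]))
        (PySem.Dict.mk l)).items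
      = l.map (fun kv => (kv.1, kv.2 ++ pvOcc kv.1 w s))
        ++ (pvNewKeys (l.map Prod.fst) w).map (fun k => (k, pvOcc k w s)) := by
  induction w generalizing s l with
  | nil =>
    simp [PySem.List.enumerate, pvNewKeys, pvOcc]
  | cons r t ih =>
    rw [pvEnum_cons, List.foldl_cons]
    by_cases hr : r ∈ l.map Prod.fst
    · -- r is already a key: modify updates in place
      obtain ⟨p, hp, hpr⟩ := List.mem_map.mp hr
      have hfind : l.find? (fun q => q.1 == r) = some p := by
        rw [← hpr]; exact pvFind_of_mem_nodup l p hnd hp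
      have hcont : (PySem.Dict.mk l).contains r = true :=
        List.any_eq_true.mpr ⟨p, hp, by simp [hpr]⟩
      have hstep : PySem.Dict.modify (PySem.Dict.mk l) r [] (fun v => v ++ [(s : Int)])
          = PySem.Dict.mk (l.map (fun q => if q.1 == r then (r, p.2 ++ [s]) else q)) := by
        simp [PySem.Dict.modify, PySem.Dict.insert, hcont, PySem.Dict.getD, PySem.Dict.get?, hfind]
      rw [hstep]
      have hkeys : ((l.map (fun q => if q.1 == r then (r, p.2 ++ [s]) else q)).map Prod.fst)
          = l.map Prod.fst := by
        rw [List.map_map]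
        apply List.map_congr_left
        intro q _
        by_cases hq : q.1 = r <;> simp [hq]
      rw [ih _ _ (by rw [hkeys]; exact hnd)]
      congr 1
      · -- the updated-items part
        rw [List.map_map]
        apply List.map_congr_left
        intro q hq
        by_cases hq1 : q.1 = r
        · have : q = p := by
            have h1 : l.find? (fun x => x.1 == q.1) = some q := pvFind_of_mem_nodup l q hnd hq
            rw [hq1, hfind] at h1
            exact (Option.some.injEq _ _ ▸ h1).symm
          subst this
          simp [hq1, pvOcc_cons]
        · simp [hq1, pvOcc_cons, Ne.symm hq1]
      · -- the new-keys part
        rw [hkeys, pvNewKeys, if_pos hr]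
        apply List.map_congr_left
        intro k hk
        have hkr : r ≠ k := fun h => (pvMem_newKeys _ _ _ hk) (h ▸ hr)
        simp [pvOcc_cons, hkr]
    · -- r is a new key: appended at the end with [s]
      have hcont : (PySem.Dict.mk l).contains r = false := by
        rw [Bool.eq_false_iff]
        intro hc
        obtain ⟨p, hp, hpr⟩ := List.any_eq_true.mp hc
        exact hr ((beq_iff_eq.mp hpr) ▸ List.mem_map_of_mem (f := Prod.fst) hp)
      have hfind : l.find? (fun q => q.1 == r) = none := by
        rw [List.find?_eq_none]
        intro p hp hpr
        exact hr ((beq_iff_eq.mp hpr) ▸ List.mem_map_of_mem (f := Prod.fst) hp)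
      have hstep : PySem.Dict.modify (PySem.Dict.mk l) r [] (fun v => v ++ [(s : Int)])
          = PySem.Dict.mk (l ++ [(r, [s])]) := by
        simp [PySem.Dict.modify, PySem.Dict.insert, hcont, PySem.Dict.getD, PySem.Dict.get?, hfind]
      rw [hstep]
      have hnd' : ((l ++ [(r, [(s : Int)])]).map Prod.fst).Nodup := by
        simp only [List.map_append, List.map_cons, List.map_nil]
        exact List.Nodup.append hnd (List.nodup_singleton r)
          (by simpa [List.disjoint_singleton] using hr)
      rw [ih _ _ hnd']
      rw [pvNewKeys, if_neg hr]
      simp only [List.map_append, List.map_cons, List.map_nil, List.append_assoc]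
      congr 1
      · apply List.map_congr_left
        intro q hq
        have hq1 : q.1 ≠ r := fun h => hr (h ▸ List.mem_map_of_mem (f := Prod.fst) hq)
        simp [pvOcc_cons, Ne.symm hq1]
      · rw [pvNewKeys_congr (l.map Prod.fst ++ [r]) (r :: l.map Prod.fst) t (by intro x; simp [or_comm]),
          List.singleton_append]
        congr 1
        · rw [pvOcc_cons, if_pos rfl]
        · apply List.map_congr_left
          intro k hk
          have hkr : r ≠ k := fun h =>
            (pvMem_newKeys _ _ _ hk) (h ▸ List.mem_cons_self)
          simp [pvOcc_cons, hkr]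

-- B's dedup loop produces exactly pvNewKeys
theorem pvDedup (w : List (List Int)) (acc : List (List Int)) :
    w.foldl (fun acc row => if row ∈ acc then acc else acc ++ [row]) acc
      = acc ++ pvNewKeys acc w := by
  induction w generalizing acc with
  | nil => simp [pvNewKeys]
  | cons r t ih =>
    simp only [List.foldl_cons, pvNewKeys]
    by_cases hr : r ∈ acc
    · simp [hr, ih]
    · rw [if_neg hr, if_neg hr, ih]
      rw [pvNewKeys_congr (acc ++ [r]) (r :: acc) t (by intro x; simp [or_comm])]
      simp

-- the grouped list is already sorted by first index
theorem pvPW (w : List (List Int)) (s : Int) (seen : List (List Int)) :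
    ((pvNewKeys seen w).map (fun k => (k, pvOcc k w s))).Pairwise
      (fun a b => a.2.headD 0 ≤ b.2.headD 0) := by
  induction w generalizing s seen with
  | nil => simp [pvNewKeys]
  | cons r t ih =>
    simp only [pvNewKeys]
    split
    · have hcg : (pvNewKeys seen t).map (fun k => (k, pvOcc k (r :: t) s))
          = (pvNewKeys seen t).map (fun k => (k, pvOcc k t (s + 1))) := by
        apply List.map_congr_left
        intro k hk
        have hkr : r ≠ k := fun h => (pvMem_newKeys seen t k hk) (h ▸ ‹r ∈ seen›)
        simp [pvOcc_cons, hkr]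
      rw [hcg]; exact ih (s + 1) seen
    · simp only [List.map_cons, List.pairwise_cons]
      constructor
      · intro b hb
        obtain ⟨k, hk, hkb⟩ := List.mem_map.mp hb
        have hkr : r ≠ k := fun h => (pvMem_newKeys _ _ _ hk) (h ▸ List.mem_cons_self)
        obtain ⟨j, l, hjl, hj⟩ := pvOcc_head (r :: seen) t k (s + 1) hk
        subst hkb
        simp [pvOcc_cons, hkr, hjl]
        omega
      · have hcg : (pvNewKeys (r :: seen) t).map (fun k => (k, pvOcc k (r :: t) s))
            = (pvNewKeys (r :: seen) t).map (fun k => (k, pvOcc k t (s + 1))) := by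
          apply List.map_congr_left
          intro k hk
          have hkr : r ≠ k := fun h => (pvMem_newKeys _ _ _ hk) (h ▸ List.mem_cons_self)
          simp [pvOcc_cons, hkr]
        rw [hcg]; exact ih (s + 1) (r :: seen)

-- ===== VERDICT (by name: the statement is the Claim_ definition above) =====
theorem group_rows_by_col_pattern_spec : Claim_equal_group_rows_by_col_pattern := by
  intro weights _
  unfold Spec_group_rows_by_col_pattern group_rows_by_col_pattern group_rows_by_col_pattern_alt
  rw [show (PySem.Dict.empty : PySem.Dict (List Int) (List Int)) = PySem.Dict.mk [] from rfl,
    pvFold weights 0 [] (by simp)]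
  simp only [List.map_nil, List.nil_append, List.map_nil]
  rw [PySem.List.sorted_eq_self_of_pairwise _ _ (pvPW weights 0 [])]
  rw [pvDedup weights []]
  simp only [List.nil_append]
  rfl
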